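-- pv_equiv track=rewrite | github.com/Sumedh3113/New2018 | MacD_string.py | old_macdonald
-- ===== SOURCE A (Python) =====
-- def old_macdonald(name):
--     s = ''
--     for i in range(len(name)):
--         if i == 0:
--             s =s + name[0].upper()
--         elif i == 3:
--             s =s + name[3].upper()
--         else:
--             s =s + name[i]
--     return s
-- ===== SOURCE B (Python) =====
-- def old_macdonald(name):
--     chars = list(name)
--     if len(chars) > 0:
--         chars[0] = chars[0].upper()
--     if len(chars) > 3:
--         chars[3] = chars[3].upper()
--     return ''.join(chars)
-- ===== Notes on version B (the rewrite author's own statement) =====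
-- stated objective: idiomatic
-- what changed: Replaces the per-index loop with if/elif branches by building a char list once and mutating only positions 0 and 3 under length guards, then joining.
import Mathlib
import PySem

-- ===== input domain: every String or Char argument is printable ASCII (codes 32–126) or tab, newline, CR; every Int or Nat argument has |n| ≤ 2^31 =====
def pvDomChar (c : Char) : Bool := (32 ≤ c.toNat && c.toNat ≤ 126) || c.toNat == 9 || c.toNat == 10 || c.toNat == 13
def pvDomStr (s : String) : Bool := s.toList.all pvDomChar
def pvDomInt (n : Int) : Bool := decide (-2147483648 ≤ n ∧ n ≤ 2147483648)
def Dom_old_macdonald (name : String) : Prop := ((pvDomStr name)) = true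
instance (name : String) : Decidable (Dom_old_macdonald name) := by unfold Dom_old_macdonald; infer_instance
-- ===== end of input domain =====

-- B replaces A's per-index loop with branches by targeted, length-guarded updates of positions 0 and 3 on a char list (idiomatic; return value only).

-- ===== PORT A =====
def old_macdonald (name : String) : String :=
  let cs := name.toList
  String.ofList ((PySem.List.pyRange 0 (PySem.Chars.len cs) 1).foldl (fun s i =>
    if i = 0 then s ++ [PySem.Chars.upperChar (PySem.List.pyGetD cs 0 ' ')]
    else if i = 3 then s ++ [PySem.Chars.upperChar (PySem.List.pyGetD cs 3 ' ')]
    else s ++ [PySem.List.pyGetD cs i ' ']) [])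

-- ===== PORT B =====
def old_macdonald_alt (name : String) : String :=
  let cs := name.toList
  let cs1 := if 0 < cs.length then cs.set 0 (PySem.Chars.upperChar (cs.getD 0 ' ')) else cs
  let cs2 := if 3 < cs1.length then cs1.set 3 (PySem.Chars.upperChar (cs1.getD 3 ' ')) else cs1
  String.ofList cs2

-- ===== PRECONDITION & SPEC =====
def Spec_old_macdonald (name : String) (out : String) : Prop := out = old_macdonald_alt name
instance (name : String) (out : String) : Decidable (Spec_old_macdonald name out) := by unfold Spec_old_macdonald; infer_instance

-- ===== CLAIM (what is proved, stated in full; the proofs are below) =====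
def Claim_equal_old_macdonald : Prop := ∀ (name : String), Dom_old_macdonald name → Spec_old_macdonald name (old_macdonald name)

-- ===== LEMMAS AND PROOFS =====

theorem lists_eq (cs : List Char) :
    (PySem.List.pyRange 0 (PySem.Chars.len cs) 1).foldl (fun s i =>
      if i = 0 then s ++ [PySem.Chars.upperChar (PySem.List.pyGetD cs 0 ' ')]
      else if i = 3 then s ++ [PySem.Chars.upperChar (PySem.List.pyGetD cs 3 ' ')]
      else s ++ [PySem.List.pyGetD cs i ' ']) [] =
    (let cs1 := if 0 < cs.length then cs.set 0 (PySem.Chars.upperChar (cs.getD 0 ' ')) else cs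
     if 3 < cs1.length then cs1.set 3 (PySem.Chars.upperChar (cs1.getD 3 ' ')) else cs1) := by
  have hp0 : PySem.List.pyGetD cs 0 ' ' = cs.getD 0 ' ' := by
    rw [show (0 : Int) = ((0 : Nat) : Int) from rfl, PySem.List.pyGetD_natCast]
  have hp3 : PySem.List.pyGetD cs 3 ' ' = cs.getD 3 ' ' := by
    rw [show (3 : Int) = ((3 : Nat) : Int) from rfl, PySem.List.pyGetD_natCast]
  have hfun : (fun (s : List Char) (i : Int) =>
      if i = 0 then s ++ [PySem.Chars.upperChar (PySem.List.pyGetD cs 0 ' ')]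
      else if i = 3 then s ++ [PySem.Chars.upperChar (PySem.List.pyGetD cs 3 ' ')]
      else s ++ [PySem.List.pyGetD cs i ' ']) =
      (fun s i => s ++ [if i = 0 then PySem.Chars.upperChar (PySem.List.pyGetD cs 0 ' ')
        else if i = 3 then PySem.Chars.upperChar (PySem.List.pyGetD cs 3 ' ')
        else PySem.List.pyGetD cs i ' ']) := by
    funext s i; split_ifs <;> rfl
  rw [hfun, PySem.List.foldl_append_singleton_eq_map, List.nil_append]
  have hlen : PySem.Chars.len cs = (cs.length : Int) := by simp [PySem.Chars.len]
  rw [hlen, PySem.List.pyRange_one]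
  simp only [zero_add, Int.sub_zero, Int.toNat_natCast, List.map_map]
  have hg : ∀ k ∈ List.range cs.length,
      ((fun (i : Int) => if i = 0 then PySem.Chars.upperChar (PySem.List.pyGetD cs 0 ' ')
        else if i = 3 then PySem.Chars.upperChar (PySem.List.pyGetD cs 3 ' ')
        else PySem.List.pyGetD cs i ' ') ∘ (fun (k : Nat) => (k : Int))) k =
      (fun (k : Nat) => if k = 0 then PySem.Chars.upperChar (cs.getD 0 ' ')
        else if k = 3 then PySem.Chars.upperChar (cs.getD 3 ' ')
        else cs.getD k ' ') k := by
    intro k _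
    simp only [Function.comp_apply]
    by_cases k0 : k = 0
    · subst k0; norm_num [hp0]
    · by_cases k3 : k = 3
      · subst k3; norm_num [hp3]
      · rw [if_neg (by exact_mod_cast k0), if_neg (by exact_mod_cast k3),
            PySem.List.pyGetD_natCast, if_neg k0, if_neg k3]
  rw [List.map_congr_left hg]
  apply List.ext_getElem
  · simp only [List.length_map, List.length_range]
    split_ifs <;> simp
  · intro i h1 h2
    have hi : i < cs.length := by simpa using h1
    have hc0 : 0 < cs.length := Nat.lt_of_le_of_lt (Nat.zero_le i) hi
    simp only [List.getElem_map, List.getElem_range, if_pos hc0]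
    have hgd3 : (cs.set 0 (PySem.Chars.upperChar (cs.getD 0 ' '))).getD 3 ' ' = cs.getD 3 ' ' := by
      simp [List.getD]
    by_cases hc3 : 3 < cs.length
    · simp only [List.length_set, if_pos hc3, List.getElem_set, hgd3]
      by_cases i3 : i = 3
      · subst i3; simp
      · have i3' : ¬(3 = i) := fun h => i3 h.symm
        by_cases i0 : i = 0
        · subst i0; simp
        · have i0' : ¬(0 = i) := fun h => i0 h.symm
          simp [i0, i3, i0', i3', List.getD, List.getElem?_eq_getElem hi]
    · simp only [List.length_set, if_neg hc3, List.getElem_set]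
      have i3 : i ≠ 3 := by omega
      have i3' : ¬(3 = i) := fun h => i3 h.symm
      by_cases i0 : i = 0
      · subst i0; simp
      · have i0' : ¬(0 = i) := fun h => i0 h.symm
        simp [i0, i3, i0', List.getD, List.getElem?_eq_getElem hi]

-- ===== VERDICT (by name: the statement is the Claim_ definition above) =====
theorem old_macdonald_spec : Claim_equal_old_macdonald := by
  intro name _
  unfold Spec_old_macdonald old_macdonald old_macdonald_alt
  simp only []
  exact congrArg String.ofList (lists_eq name.toList)
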